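-- pv_equiv track=rewrite | github.com/rebahozkoc/libreofficepythonmacros | helper.py | inside_base26_to_decimal
-- ===== SOURCE A (Python) =====
-- def inside_base26_to_decimal(start, end):
--     """A supplementary function for field_determine"""
--     base_number = 1
--     end_value = 0
--     start_value = 0
--     while len(end) != 0:
--         end_value += (ord(end[-1]) - 64) * base_number
--         base_number *= 26
--         end = end[:-1]
--     base_number = 1
--     while len(start) != 0:
--         start_value += (ord(start[-1]) - 64) * base_number
--         base_number *= 26
--         start = start[:-1]
--     return start_value, end_value
-- ===== SOURCE B (Python) =====
-- def col_value(s):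
--     value = 0
--     for c in s:
--         value = value * 26 + (ord(c) - 64)
--     return value
--
--
-- def inside_base26_to_decimal(start, end):
--     """A supplementary function for field_determine"""
--     return col_value(start), col_value(end)
-- ===== Notes on version B (the rewrite author's own statement) =====
-- stated objective: simpler
-- what changed: Replaces the two duplicated reverse scans maintaining a positional base-power accumulator (with quadratic string re-slicing end = end[:-1]) with one Horner-style left-to-right helper (value = value*26 + digit) applied to both arguments.
import Mathlib
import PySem

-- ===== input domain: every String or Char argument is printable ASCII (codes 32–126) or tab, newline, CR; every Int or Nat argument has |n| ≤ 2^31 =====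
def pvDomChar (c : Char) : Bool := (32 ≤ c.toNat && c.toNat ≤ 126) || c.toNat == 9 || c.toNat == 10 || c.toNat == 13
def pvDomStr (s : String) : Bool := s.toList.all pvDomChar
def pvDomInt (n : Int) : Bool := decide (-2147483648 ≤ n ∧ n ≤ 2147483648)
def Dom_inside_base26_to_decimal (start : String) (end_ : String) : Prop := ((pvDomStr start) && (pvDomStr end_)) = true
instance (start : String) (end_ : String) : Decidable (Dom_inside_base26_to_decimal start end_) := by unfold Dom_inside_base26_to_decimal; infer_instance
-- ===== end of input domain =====

-- B replaces A's two duplicated reverse scans (positional base-power accumulator) with one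
-- Horner left-to-right helper applied to both arguments; objective: simpler.

-- ===== PORT A =====
-- A's while loop: consume the LAST character, multiply the running base power by 26,
-- drop the last character; recursion on the list of characters mirrors this exactly.
def pvALoop (s : List Char) (base : Int) (acc : Int) : Int :=
  match h : s.getLast? with
  | none => acc
  | some c =>
      pvALoop s.dropLast (base * 26) (acc + ((c.toNat : Int) - 64) * base)
termination_by s.length
decreasing_by
  have hne : s ≠ [] := by intro hn; simp [hn] at h
  have hpos : 0 < s.length := List.length_pos_of_ne_nil hne
  simp only [List.length_dropLast]
  omega

def inside_base26_to_decimal (start : String) (end_ : String) : Int × Int :=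
  let end_value := pvALoop end_.toList 1 0
  let start_value := pvALoop start.toList 1 0
  (start_value, end_value)

-- ===== PORT B =====
def pvColValue (s : String) : Int :=
  s.toList.foldl (fun v c => v * 26 + ((c.toNat : Int) - 64)) 0

def inside_base26_to_decimal_alt (start : String) (end_ : String) : Int × Int :=
  (pvColValue start, pvColValue end_)

-- ===== PRECONDITION & SPEC =====
def Spec_inside_base26_to_decimal (start : String) (end_ : String) (out : Int × Int) : Prop := out = inside_base26_to_decimal_alt start end_
instance (start : String) (end_ : String) (out : Int × Int) : Decidable (Spec_inside_base26_to_decimal start end_ out) := by unfold Spec_inside_base26_to_decimal; infer_instance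

-- ===== CLAIM (what is proved, stated in full; the proofs are below) =====
def Claim_equal_inside_base26_to_decimal : Prop := ∀ (start : String) (end_ : String), Dom_inside_base26_to_decimal start end_ → Spec_inside_base26_to_decimal start end_ (inside_base26_to_decimal start end_)

-- ===== LEMMAS AND PROOFS =====
def pvHorner (l : List Char) : Int :=
  l.foldl (fun v c => v * 26 + ((c.toNat : Int) - 64)) 0

theorem pvHorner_append (l : List Char) (c : Char) :
    pvHorner (l ++ [c]) = pvHorner l * 26 + ((c.toNat : Int) - 64) := by
  simp [pvHorner]

theorem pvALoop_eq (l : List Char) (base acc : Int) :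
    pvALoop l base acc = acc + base * pvHorner l := by
  induction l using List.reverseRecOn generalizing base acc with
  | nil => simp [pvALoop, pvHorner]
  | append_singleton l c ih =>
      rw [pvALoop]
      split
      · rename_i heq; simp at heq
      · rename_i c' heq
        have hc : c = c' := by simpa using heq
        cases hc
        simp only [List.dropLast_concat]
        rw [ih, pvHorner_append]
        ring

theorem pvColValue_eq (s : String) : pvColValue s = pvALoop s.toList 1 0 := by
  rw [pvALoop_eq]; simp [pvColValue, pvHorner]

-- ===== VERDICT (by name: the statement is the Claim_ definition above) =====
theorem inside_base26_to_decimal_spec : Claim_equal_inside_base26_to_decimal := by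
  intro start end_ _
  unfold Spec_inside_base26_to_decimal inside_base26_to_decimal inside_base26_to_decimal_alt
  rw [pvColValue_eq, pvColValue_eq]
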